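-- pv_equiv track=rewrite | github.com/viljarjf/nano | TDT4120_algdat/3/test_largest_cuboid.py | largest_cuboid
-- ===== SOURCE A (Python) =====
-- def largest_cuboid(depthmap):
--     # This is theta(n^4), and as such not fast enough
--
--     n = len(depthmap)
--
--     def find_largest_rectangle(slice):
--         """
--         slice: 2D arr, dtype bool, true -> allowed
--         """
--         #_hash = int("".join([str(j+0) for i in slice for j in i]), base = 2)
--         #if _hash in cache:
--         #    return cache[_hash]
--         aux_arr = [[0 for _ in range(n)] for __ in range(n)]
--
--         # find how long each point can see in x-axis
--         for i in range(n):
--             for j in range(n):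
--                 ind = j
--                 n_x = 0
--                 while ind < n and slice[i][ind]:
--                     n_x += 1
--                     ind += 1
--                 aux_arr[i][j] = n_x
--
--         # basically, find the largest rectangle that fits
--         # with (i,j) as top left corner.
--         # skip points that guarantees smaller rectangles
--         # than alreasy discovered
--
--         res = max([j for i in aux_arr for j in i])
--         for i in range(n):
--             for j in range(n):
--                 n_x  = aux_arr[i][j]
--                 if n_x:
--                     cur_n_x = n_x
--                     for k in range(i+1, n):
--                         n_x_next = aux_arr[k][j]
--                         if n_x_next <= cur_n_x:
--                             aux_arr[k][j] = 0
--
--                         cur_n_x = n_x_next if n_x_next < cur_n_x else cur_n_x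
--
--                         new = (k-i + 1) * cur_n_x
--                         if new > res:
--                             res = new
--
--         #cache[_hash] = res
--         return res
--
--     cur_max = 0
--     for y in range(n):
--         for x in range(n):
--             depth = depthmap[y][x]
--             new = find_largest_rectangle([[depthmap[i][j] >= depth for j in range(n)] for i in range(n)])*depth
--             if new > cur_max:
--                 cur_max = new
--     return cur_max
-- ===== SOURCE B (Python) =====
-- def largest_cuboid(depthmap):
--     # Direct O(n^4) maximisation of volume = area * (min depth over the rectangle):
--     # for each top row i, maintain per-column minima of the row strip i..k, then
--     # sweep each column window [j..l] with a running minimum.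
--     n = len(depthmap)
--     best = 0
--     for i in range(n):
--         colmin = [depthmap[i][j] for j in range(n)]
--         for k in range(i, n):
--             if k > i:
--                 colmin = [min(colmin[j], depthmap[k][j]) for j in range(n)]
--             h = k - i + 1
--             for j in range(n):
--                 m = colmin[j]
--                 for l in range(j, n):
--                     if colmin[l] < m:
--                         m = colmin[l]
--                     v = h * (l - j + 1) * m
--                     if v > best:
--                         best = v
--     return best
-- ===== Notes on version B (the rewrite author's own statement) =====
-- stated objective: faster
-- what changed: Instead of recomputing a boolean mask and running a largest-rectangle-with-pruning subroutine for every cell's depth threshold (O(n^5)), B maximises area*min-depth directly over all axis-aligned rectangles with per-column strip minima and a running window minimum, in O(n^4) with no masks or thresholds.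
import Mathlib
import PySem

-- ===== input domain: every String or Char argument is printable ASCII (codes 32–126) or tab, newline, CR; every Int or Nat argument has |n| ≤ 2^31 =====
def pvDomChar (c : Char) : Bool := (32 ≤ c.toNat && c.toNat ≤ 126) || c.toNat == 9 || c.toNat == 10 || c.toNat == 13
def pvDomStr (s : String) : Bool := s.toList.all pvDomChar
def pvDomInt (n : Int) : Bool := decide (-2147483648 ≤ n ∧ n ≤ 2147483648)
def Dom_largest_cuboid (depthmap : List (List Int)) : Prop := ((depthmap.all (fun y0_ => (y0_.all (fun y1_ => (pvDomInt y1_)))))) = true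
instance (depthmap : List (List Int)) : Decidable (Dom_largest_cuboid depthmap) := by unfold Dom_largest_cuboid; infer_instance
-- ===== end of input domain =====

-- B replaces A's per-cell threshold masks + pruned largest-rectangle subroutine by a direct
-- maximisation of area × min-depth over all axis-aligned rectangles (strip minima + running
-- window minimum); a timing run measured it faster (O(n^4) vs O(n^5) loop structure).

-- ===== PORT A =====
-- all indices produced by the loops are nonnegative and (inside Pre_) in range,
-- so xs.getD i 0 is exact for Python's xs[i] here
def pvGetI (xs : List Int) (j : Nat) : Int := xs.getD j 0
def pvGetB (xs : List Bool) (j : Nat) : Bool := xs.getD j false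
def pvRow (m : List (List Int)) (i : Nat) : List Int := m.getD i []
def pvRowB (m : List (List Bool)) (i : Nat) : List Bool := m.getD i []

-- the `while ind < n and slice[i][ind]` loop
def pvWhile (row : List Bool) (n ind : Nat) (acc : Int) : Int :=
  if h : ind < n then
    if pvGetB row ind then pvWhile row n (ind + 1) (acc + 1) else acc
  else acc
termination_by n - ind

-- aux_arr after the first double loop (the zero-initialised array is overwritten everywhere)
def pvAux (slice : List (List Bool)) (n : Nat) : List (List Int) :=
  (List.range n).map (fun i => (List.range n).map (fun j => pvWhile (pvRowB slice i) n j 0))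

-- max([...]) over the flattened aux array; in every call n ≥ 1, so the list is
-- nonempty and the .getD default is never used (Python would raise on [])
def pvMaxFlat (aux : List (List Int)) : Int := (aux.flatMap id).max?.getD 0

-- one step of the `for k in range(i+1, n)` loop; state (aux_arr, cur_n_x, res)
def pvKStep (i j : Nat) (st : List (List Int) × Int × Int) (k : Nat) :
    List (List Int) × Int × Int :=
  let aux := st.1; let cur := st.2.1; let res := st.2.2
  let v := pvGetI (pvRow aux k) j
  let aux' := if v ≤ cur then aux.set k ((pvRow aux k).set j 0) else aux
  let cur' := if v < cur then v else cur
  let nw := ((k : Int) - (i : Int) + 1) * cur'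
  (aux', cur', if nw > res then nw else res)

-- body of the `for j in range(n)` loop of the second phase
def pvJStep (n i : Nat) (st : List (List Int) × Int) (j : Nat) : List (List Int) × Int :=
  let aux := st.1; let res := st.2
  let nx := pvGetI (pvRow aux i) j
  if nx ≠ 0 then
    let r := (List.range' (i + 1) (n - (i + 1))).foldl (pvKStep i j) (aux, nx, res)
    (r.1, r.2.2)
  else (aux, res)

def pvIStep (n : Nat) (st : List (List Int) × Int) (i : Nat) : List (List Int) × Int :=
  (List.range n).foldl (pvJStep n i) st

-- find_largest_rectangle
def pvFLR (slice : List (List Bool)) (n : Nat) : Int :=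
  let aux := pvAux slice n
  ((List.range n).foldl (pvIStep n) (aux, pvMaxFlat aux)).2

-- [[depthmap[i][j] >= depth for j in range(n)] for i in range(n)]
def pvSlice (depthmap : List (List Int)) (n : Nat) (depth : Int) : List (List Bool) :=
  (List.range n).map (fun i => (List.range n).map (fun j =>
    decide (pvGetI (pvRow depthmap i) j ≥ depth)))

def largest_cuboid (depthmap : List (List Int)) : Int :=
  let n := depthmap.length
  (List.range n).foldl (fun cm y =>
    (List.range n).foldl (fun cm x =>
      let depth := pvGetI (pvRow depthmap y) x
      let nw := pvFLR (pvSlice depthmap n depth) n * depth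
      if nw > cm then nw else cm) cm) 0

-- ===== PORT B =====
-- innermost `for l in range(j, n)` loop; state (m, best)
def pvBLStep (h : Int) (j : Nat) (colmin : List Int) (st : Int × Int) (l : Nat) : Int × Int :=
  let m := if pvGetI colmin l < st.1 then pvGetI colmin l else st.1
  let v := h * ((l : Int) - (j : Int) + 1) * m
  (m, if v > st.2 then v else st.2)

-- `for j in range(n)` loop over left columns
def pvBJStep (n : Nat) (h : Int) (colmin : List Int) (best : Int) (j : Nat) : Int :=
  ((List.range' j (n - j)).foldl (pvBLStep h j colmin) (pvGetI colmin j, best)).2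

-- `for k in range(i, n)` loop; state (colmin, best)
def pvBKStep (d : List (List Int)) (n i : Nat) (st : List Int × Int) (k : Nat) : List Int × Int :=
  let colmin := if i < k then
      (List.range n).map (fun j => min (pvGetI st.1 j) (pvGetI (pvRow d k) j))
    else st.1
  (colmin, (List.range n).foldl (pvBJStep n ((k : Int) - (i : Int) + 1) colmin) st.2)

def largest_cuboid_alt (depthmap : List (List Int)) : Int :=
  let n := depthmap.length
  (List.range n).foldl (fun best i =>
    ((List.range' i (n - i)).foldl (pvBKStep depthmap n i)
      ((List.range n).map (fun j => pvGetI (pvRow depthmap i) j), best)).2) 0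

-- ===== PRECONDITION & SPEC =====
-- Pre_ excludes exactly the ragged inputs (some row shorter than the number of rows),
-- on which Python A raises IndexError (B raises there as well).
def Pre_largest_cuboid (depthmap : List (List Int)) : Prop :=
  ∀ row ∈ depthmap, depthmap.length ≤ row.length
instance (depthmap : List (List Int)) : Decidable (Pre_largest_cuboid depthmap) := by
  unfold Pre_largest_cuboid; infer_instance

def pvWitness_largest_cuboid : List (List Int) := [[1, 2], [3, 4]]

def Spec_largest_cuboid (depthmap : List (List Int)) (out : Int) : Prop := out = largest_cuboid_alt depthmap
instance (depthmap : List (List Int)) (out : Int) : Decidable (Spec_largest_cuboid depthmap out) := by unfold Spec_largest_cuboid; infer_instance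

-- ===== CLAIM (what is proved, stated in full; the proofs are below) =====
def Claim_equal_largest_cuboid : Prop := ∀ (depthmap : List (List Int)), Dom_largest_cuboid depthmap → Pre_largest_cuboid depthmap → Spec_largest_cuboid depthmap (largest_cuboid depthmap)


-- ===== LEMMAS AND PROOFS =====

-- ---- generic helpers ----
theorem pvIfMax (a v : Int) : (if v > a then v else a) = max a v := by
  rcases le_or_gt v a with h | h
  · rw [if_neg (by omega), max_eq_left h]
  · rw [if_pos h, max_eq_right (le_of_lt h)]

theorem pvIfMin (a v : Int) : (if v < a then v else a) = min a v := by
  rcases le_or_gt a v with h | h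
  · rw [if_neg (by omega), min_eq_left h]
  · rw [if_pos h, min_eq_right (le_of_lt h)]

theorem pvGetD_map_range {α : Type} (f : Nat → α) (n i : Nat) (d : α) (h : i < n) :
    ((List.range n).map f).getD i d = f i := by
  simp [List.getD, h]

theorem pvGetD_set_self (l : List Int) (k : Nat) (a : Int) (hk : k < l.length) (d : Int) :
    (l.set k a).getD k d = a := by
  simp [List.getD, List.getElem?_set, hk]

theorem pvGetD_set_ne (l : List Int) (k : Nat) (a : Int) (t : Nat) (ht : t ≠ k) (d : Int) :
    (l.set k a).getD t d = l.getD t d := by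
  simp [List.getD, List.getElem?_set, Ne.symm ht]

theorem pvGetDL_set_ne (l : List (List Int)) (k : Nat) (a : List Int) (t : Nat) (ht : t ≠ k)
    (d : List Int) : (l.set k a).getD t d = l.getD t d := by
  simp [List.getD, List.getElem?_set, Ne.symm ht]

theorem pvGetDL_set_self (l : List (List Int)) (k : Nat) (a : List Int) (hk : k < l.length)
    (d : List Int) : (l.set k a).getD k d = a := by
  simp [List.getD, List.getElem?_set, hk]

-- min over indices a..b (inclusive); equals g a when b ≤ a
def pvMinOn (g : Nat → Int) (a b : Nat) : Int :=
  if a < b then min (g a) (pvMinOn g (a + 1) b) else g a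
termination_by b - a

def pvMaxOn (g : Nat → Int) (a b : Nat) : Int :=
  if a < b then max (g a) (pvMaxOn g (a + 1) b) else g a
termination_by b - a

theorem pvMinOn_le (g : Nat → Int) (b : Nat) : ∀ a t, a ≤ t → t ≤ b → pvMinOn g a b ≤ g t := by
  intro a
  induction a using pvMinOn.induct (b := b) with
  | case1 a hab ih =>
    intro t h1 h2
    rw [pvMinOn, if_pos hab]
    rcases Nat.eq_or_lt_of_le h1 with h | h
    · exact le_trans (min_le_left _ _) (by rw [h])
    · exact le_trans (min_le_right _ _) (ih t h h2)
  | case2 a hab =>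
    intro t h1 h2
    rw [pvMinOn, if_neg hab]
    have : t = a := by omega
    rw [this]

theorem pvLe_minOn (g : Nat → Int) (b : Nat) (c : Int) :
    ∀ a, a ≤ b → (∀ t, a ≤ t → t ≤ b → c ≤ g t) → c ≤ pvMinOn g a b := by
  intro a
  induction a using pvMinOn.induct (b := b) with
  | case1 a hab ih =>
    intro _ h
    rw [pvMinOn, if_pos hab]
    exact le_min (h a le_rfl (by omega)) (ih hab (fun t h1 h2 => h t (by omega) h2))
  | case2 a hab =>
    intro hab' h
    rw [pvMinOn, if_neg hab]
    exact h a le_rfl (by omega)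

theorem pvMinOn_attain (g : Nat → Int) (b : Nat) :
    ∀ a, ∃ t, a ≤ t ∧ (t ≤ b ∨ t = a) ∧ pvMinOn g a b = g t := by
  intro a
  induction a using pvMinOn.induct (b := b) with
  | case1 a hab ih =>
    rw [pvMinOn, if_pos hab]
    rcases ih with ⟨t, h1, h2, h3⟩
    rcases le_or_gt (g a) (pvMinOn g (a + 1) b) with h | h
    · exact ⟨a, le_rfl, Or.inl (by omega), by rw [min_eq_left h]⟩
    · exact ⟨t, by omega, Or.inl (by omega), by rw [min_eq_right (le_of_lt h), h3]⟩
  | case2 a hab =>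
    rw [pvMinOn, if_neg hab]
    exact ⟨a, le_rfl, Or.inr rfl, rfl⟩

theorem pvMinOn_attain' (g : Nat → Int) (a b : Nat) (h : a ≤ b) :
    ∃ t, a ≤ t ∧ t ≤ b ∧ pvMinOn g a b = g t := by
  rcases Nat.eq_or_lt_of_le h with he | hl
  · exact ⟨a, le_rfl, by omega, by subst he; rw [pvMinOn, if_neg (by omega)]⟩
  · rcases pvMinOn_attain g b a with ⟨t, h1, h2, h3⟩
    exact ⟨t, h1, by omega, h3⟩

theorem pvMinOn_congr (g g' : Nat → Int) (b : Nat) :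
    ∀ a, a ≤ b → (∀ t, a ≤ t → t ≤ b → g t = g' t) → pvMinOn g a b = pvMinOn g' a b := by
  intro a
  induction a using pvMinOn.induct (b := b) with
  | case1 a hab ih =>
    intro _ h
    rw [pvMinOn, if_pos hab]
    conv_rhs => rw [pvMinOn, if_pos hab]
    rw [h a le_rfl (by omega), ih hab (fun t h1 h2 => h t (by omega) h2)]
  | case2 a hab =>
    intro hab' h
    rw [pvMinOn, if_neg hab]
    conv_rhs => rw [pvMinOn, if_neg hab]
    exact h a le_rfl (by omega)

theorem pvMinOn_mono (g g' : Nat → Int) (a b : Nat) (hab : a ≤ b)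
    (h : ∀ t, a ≤ t → t ≤ b → g t ≤ g' t) : pvMinOn g a b ≤ pvMinOn g' a b := by
  rcases pvMinOn_attain' g' a b hab with ⟨t, h1, h2, h3⟩
  rw [h3]
  exact le_trans (pvMinOn_le g b a t h1 h2) (h t h1 h2)

theorem pvMinOn_base (g : Nat → Int) (a b : Nat) (h : b ≤ a) : pvMinOn g a b = g a := by
  rw [pvMinOn, if_neg (by omega)]

theorem pvMinOn_succ_left (g : Nat → Int) (a b : Nat) (h : a < b) :
    pvMinOn g a b = min (g a) (pvMinOn g (a + 1) b) := by
  rw [pvMinOn, if_pos h]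

theorem pvMinOn_succ_right (g : Nat → Int) (b : Nat) :
    ∀ a, a ≤ b → pvMinOn g a (b + 1) = min (pvMinOn g a b) (g (b + 1)) := by
  intro a
  induction a using pvMinOn.induct (b := b) with
  | case1 a hab ih =>
    intro _
    rw [pvMinOn_succ_left g a (b + 1) (by omega), ih hab,
      pvMinOn_succ_left g a b hab, min_assoc]
  | case2 a hab =>
    intro h
    have : a = b := by omega
    subst this
    rw [pvMinOn_succ_left g a (a + 1) (by omega), pvMinOn_base g (a + 1) (a + 1) le_rfl,
      pvMinOn_base g a a le_rfl]

theorem pvMinOn_mono_left (g : Nat → Int) (a' a b : Nat) (h1 : a' ≤ a) (h2 : a ≤ b) :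
    pvMinOn g a' b ≤ pvMinOn g a b := by
  rcases pvMinOn_attain' g a b h2 with ⟨t, k1, k2, k3⟩
  rw [k3]
  exact pvMinOn_le g b a' t (by omega) k2

theorem pvMinOn_drop (g : Nat → Int) (a t b : Nat) (h1 : a ≤ t) (h2 : t ≤ b)
    (h : ∀ x, a ≤ x → x < t → g t ≤ g x) : pvMinOn g a b = pvMinOn g t b := by
  apply le_antisymm
  · rcases pvMinOn_attain' g t b h2 with ⟨u, k1, k2, k3⟩
    rw [k3]
    exact pvMinOn_le g b a u (by omega) k2
  · apply pvLe_minOn g b _ a (by omega)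
    intro u h3 h4
    rcases lt_or_ge u t with h5 | h5
    · exact le_trans (pvMinOn_le g b t t le_rfl h2) (h u h3 h5)
    · exact pvMinOn_le g b t u h5 h4

theorem pvLe_maxOn (g : Nat → Int) (b : Nat) : ∀ a t, a ≤ t → t ≤ b → g t ≤ pvMaxOn g a b := by
  intro a
  induction a using pvMaxOn.induct (b := b) with
  | case1 a hab ih =>
    intro t h1 h2
    rw [pvMaxOn, if_pos hab]
    rcases Nat.eq_or_lt_of_le h1 with h | h
    · exact le_trans (by rw [h]) (le_max_left _ _)
    · exact le_trans (ih t h h2) (le_max_right _ _)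
  | case2 a hab =>
    intro t h1 h2
    rw [pvMaxOn, if_neg hab]
    have : t = a := by omega
    rw [this]

theorem pvMaxOn_attain (g : Nat → Int) (b : Nat) :
    ∀ a, ∃ t, a ≤ t ∧ (t ≤ b ∨ t = a) ∧ pvMaxOn g a b = g t := by
  intro a
  induction a using pvMaxOn.induct (b := b) with
  | case1 a hab ih =>
    rw [pvMaxOn, if_pos hab]
    rcases ih with ⟨t, h1, h2, h3⟩
    rcases le_or_gt (pvMaxOn g (a + 1) b) (g a) with h | h
    · exact ⟨a, le_rfl, Or.inl (by omega), by rw [max_eq_left h]⟩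
    · exact ⟨t, by omega, Or.inl (by omega), by rw [max_eq_right (le_of_lt h), h3]⟩
  | case2 a hab =>
    rw [pvMaxOn, if_neg hab]
    exact ⟨a, le_rfl, Or.inr rfl, rfl⟩

theorem pvMaxOn_attain' (g : Nat → Int) (a b : Nat) (h : a ≤ b) :
    ∃ t, a ≤ t ∧ t ≤ b ∧ pvMaxOn g a b = g t := by
  rcases Nat.eq_or_lt_of_le h with he | hl
  · exact ⟨a, le_rfl, by omega, by subst he; rw [pvMaxOn, if_neg (by omega)]⟩
  · rcases pvMaxOn_attain g b a with ⟨t, h1, h2, h3⟩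
    exact ⟨t, h1, by omega, h3⟩

-- increasing-fold helpers
theorem pvFoldl_inc_init (F : Int → Nat → Int) :
    ∀ (l : List Nat) (a : Int), (∀ x t, t ∈ l → x ≤ F x t) → a ≤ l.foldl F a := by
  intro l
  induction l with
  | nil => intro a _; exact le_rfl
  | cons hd tl ih =>
    intro a h
    exact le_trans (h a hd List.mem_cons_self)
      (ih (F a hd) (fun x u hu => h x u (List.mem_cons_of_mem _ hu)))

theorem pvFoldl_inc_ge (F : Int → Nat → Int) (t0 : Nat) (c : Int) :
    ∀ (l : List Nat) (a : Int), (∀ x t, t ∈ l → x ≤ F x t) → t0 ∈ l → (∀ x, c ≤ F x t0) →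
      c ≤ l.foldl F a := by
  intro l
  induction l with
  | nil => intro a _ ht0 _; cases ht0
  | cons hd tl ih =>
    intro a hinc ht0 hc
    rcases List.mem_cons.mp ht0 with h | h
    · subst h
      exact le_trans (hc a)
        (pvFoldl_inc_init F tl (F a t0) (fun x u hu => hinc x u (List.mem_cons_of_mem _ hu)))
    · exact ih (F a hd) (fun x u hu => hinc x u (List.mem_cons_of_mem _ hu)) h hc

theorem pvFoldl_inc_le (F : Int → Nat → Int) (b : Int) :
    ∀ (l : List Nat) (a : Int), a ≤ b → (∀ x t, t ∈ l → x ≤ b → F x t ≤ b) →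
      l.foldl F a ≤ b := by
  intro l
  induction l with
  | nil => intro a ha _; exact ha
  | cons hd tl ih =>
    intro a ha h
    exact ih (F a hd) (h a hd List.mem_cons_self ha) (fun x u hu => h x u (List.mem_cons_of_mem _ hu))

-- ---- the while loop ----
def pvGw (row : List Bool) (n ind : Nat) : Nat :=
  if ind < n then (if pvGetB row ind then pvGw row n (ind + 1) + 1 else 0) else 0
termination_by n - ind

theorem pvGw_pos (row : List Bool) (n ind : Nat) (h1 : ind < n) (h2 : pvGetB row ind = true) :
    pvGw row n ind = pvGw row n (ind + 1) + 1 := by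
  rw [pvGw]
  simp [h1, h2]

theorem pvGw_zero (row : List Bool) (n ind : Nat) (h : ¬ (ind < n ∧ pvGetB row ind = true)) :
    pvGw row n ind = 0 := by
  rw [pvGw]
  rcases Decidable.em (ind < n) with h1 | h1
  · rw [if_pos h1, if_neg (fun hb => h ⟨h1, hb⟩)]
  · rw [if_neg h1]

theorem pvWhile_eq (row : List Bool) (n : Nat) : ∀ ind acc,
    pvWhile row n ind acc = acc + (pvGw row n ind : Int) := by
  intro ind
  induction ind using pvGw.induct (row := row) (n := n) with
  | case1 ind hlt htrue ih =>
    intro acc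
    rw [pvWhile, dif_pos hlt, if_pos htrue, ih, pvGw_pos row n ind hlt htrue]
    push_cast
    ring
  | case2 ind hlt hfalse =>
    intro acc
    rw [pvWhile, dif_pos hlt, if_neg (by simp [hfalse]),
      pvGw_zero row n ind (by simp [hfalse])]
    simp
  | case3 ind hlt =>
    intro acc
    rw [pvWhile, dif_neg hlt, pvGw_zero row n ind (by simp [hlt])]
    simp

theorem pvGw_le (row : List Bool) (n : Nat) : ∀ ind, pvGw row n ind ≤ n - ind := by
  intro ind
  induction ind using pvGw.induct (row := row) (n := n) with
  | case1 ind hlt htrue ih => rw [pvGw_pos row n ind hlt htrue]; omega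
  | case2 ind hlt hfalse => rw [pvGw_zero row n ind (by simp [hfalse])]; omega
  | case3 ind hlt => rw [pvGw_zero row n ind (by simp [hlt])]; omega

theorem pvGw_mem (row : List Bool) (n : Nat) : ∀ ind x, ind ≤ x → x < ind + pvGw row n ind →
    x < n ∧ pvGetB row x = true := by
  intro ind
  induction ind using pvGw.induct (row := row) (n := n) with
  | case1 ind hlt htrue ih =>
    intro x h1 h2
    rw [pvGw_pos row n ind hlt htrue] at h2
    rcases Nat.eq_or_lt_of_le h1 with h | h
    · exact ⟨by omega, h ▸ htrue⟩
    · exact ih x h (by omega)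
  | case2 ind hlt hfalse =>
    intro x h1 h2
    rw [pvGw_zero row n ind (by simp [hfalse])] at h2
    omega
  | case3 ind hlt =>
    intro x h1 h2
    rw [pvGw_zero row n ind (by simp [hlt])] at h2
    omega

theorem pvGw_ge (row : List Bool) (n : Nat) : ∀ ind c, ind + c ≤ n →
    (∀ x, ind ≤ x → x < ind + c → pvGetB row x = true) → c ≤ pvGw row n ind := by
  intro ind
  induction ind using pvGw.induct (row := row) (n := n) with
  | case1 ind hlt htrue ih =>
    intro c hc hall
    rcases Nat.eq_zero_or_pos c with h | h
    · omega
    · rw [pvGw_pos row n ind hlt htrue]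
      have := ih (c - 1) (by omega) (fun x h1 h2 => hall x (by omega) (by omega))
      omega
  | case2 ind hlt hfalse =>
    intro c hc hall
    rcases Nat.eq_zero_or_pos c with h | h
    · omega
    · exact absurd (hall ind le_rfl (by omega)) (by simp [hfalse])
  | case3 ind hlt =>
    intro c hc hall
    omega

-- ---- phase-2 state ----
def pvGA (aux : List (List Int)) (t j : Nat) : Int := pvGetI (pvRow aux t) j

def pvSh (n : Nat) (aux : List (List Int)) : Prop :=
  aux.length = n ∧ ∀ r ∈ aux, r.length = n

theorem pvRow_len (n : Nat) (aux : List (List Int)) (h : pvSh n aux) (k : Nat) (hk : k < n) :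
    (pvRow aux k).length = n := by
  apply h.2
  have hk' : k < aux.length := by rw [h.1]; exact hk
  rw [pvRow, List.getD, List.getElem?_eq_getElem hk']
  exact List.getElem_mem hk'

theorem pvSh_set (n : Nat) (aux : List (List Int)) (h : pvSh n aux) (k j : Nat) (hk : k < n)
    (hj : j < n) : pvSh n (aux.set k ((pvRow aux k).set j 0)) := by
  constructor
  · rw [List.length_set, h.1]
  · intro r hr
    rcases List.mem_or_eq_of_mem_set hr with h1 | h1
    · exact h.2 r h1
    · rw [h1, List.length_set]
      exact pvRow_len n aux h k hk

theorem pvGA_set (n : Nat) (aux : List (List Int)) (h : pvSh n aux) (k j : Nat) (hk : k < n)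
    (hj : j < n) (t j' : Nat) :
    pvGA (aux.set k ((pvRow aux k).set j 0)) t j' =
      if t = k ∧ j' = j then 0 else pvGA aux t j' := by
  rcases Decidable.em (t = k) with ht | ht
  · subst ht
    rw [pvGA, pvRow, pvGetDL_set_self aux t _ (by rw [h.1]; exact hk)]
    rcases Decidable.em (j' = j) with hj' | hj'
    · subst hj'
      rw [if_pos ⟨rfl, rfl⟩, pvGetI, pvGetD_set_self _ _ _ (by rw [pvRow_len n aux h t hk]; exact hj)]
    · rw [if_neg (by tauto), pvGetI, pvGetD_set_ne _ _ _ _ hj']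
      rfl
  · rw [if_neg (by tauto), pvGA, pvRow, pvGetDL_set_ne _ _ _ _ ht]
    rfl

-- characterisation of the inner `for k in range(i+1, n)` loop of A's second phase
theorem pvKLoop (n i j : Nat) (hj : j < n) :
    ∀ (m s : Nat) (aux : List (List Int)) (cur res : Int), pvSh n aux → i < s → s + m ≤ n →
    pvSh n ((List.range' s m).foldl (pvKStep i j) (aux, cur, res)).1
    ∧ (∀ t j', ¬ (s ≤ t ∧ t < s + m ∧ j' = j) →
        pvGA ((List.range' s m).foldl (pvKStep i j) (aux, cur, res)).1 t j' = pvGA aux t j')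
    ∧ (∀ t, s ≤ t → t < s + m →
        pvGA ((List.range' s m).foldl (pvKStep i j) (aux, cur, res)).1 t j = pvGA aux t j ∨
        (pvGA ((List.range' s m).foldl (pvKStep i j) (aux, cur, res)).1 t j = 0 ∧
          pvGA aux t j ≤ cur ∧
          (s < t → pvGA aux t j ≤ pvMinOn (fun u => pvGA aux u j) s (t - 1))))
    ∧ res ≤ ((List.range' s m).foldl (pvKStep i j) (aux, cur, res)).2.2
    ∧ (∀ k, s ≤ k → k < s + m →
        ((k : Int) - (i : Int) + 1) * min cur (pvMinOn (fun u => pvGA aux u j) s k) ≤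
          ((List.range' s m).foldl (pvKStep i j) (aux, cur, res)).2.2)
    ∧ (∀ b, res ≤ b →
        (∀ k, s ≤ k → k < s + m →
          ((k : Int) - (i : Int) + 1) * min cur (pvMinOn (fun u => pvGA aux u j) s k) ≤ b) →
        ((List.range' s m).foldl (pvKStep i j) (aux, cur, res)).2.2 ≤ b) := by
  intro m
  induction m with
  | zero =>
    intro s aux cur res hsh his hsm
    refine ⟨hsh, fun t j' _ => rfl, fun t h1 h2 => by omega, le_rfl, fun k h1 h2 => by omega,
      fun b hb _ => hb⟩
  | succ m ih =>
    intro s aux cur res hsh his hsm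
    rw [List.range'_succ, List.foldl_cons]
    have hsn : s < n := by omega
    -- the single step at k = s
    have hstep : pvKStep i j (aux, cur, res) s =
        ((if pvGA aux s j ≤ cur then aux.set s ((pvRow aux s).set j 0) else aux),
          min cur (pvGA aux s j),
          max res (((s : Int) - (i : Int) + 1) * min cur (pvGA aux s j))) := by
      simp only [pvKStep, pvIfMin, pvIfMax]
      rfl
    rw [hstep]
    set v := pvGA aux s j with hv
    set aux1 := (if pvGA aux s j ≤ cur then aux.set s ((pvRow aux s).set j 0) else aux) with haux1
    have hsh1 : pvSh n aux1 := by
      rw [haux1]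
      split_ifs with h
      · exact pvSh_set n aux hsh s j hsn hj
      · exact hsh
    have hga1 : ∀ t j', ¬ (t = s ∧ j' = j) → pvGA aux1 t j' = pvGA aux t j' := by
      intro t j' h
      rw [haux1]
      split_ifs with h2
      · rw [pvGA_set n aux hsh s j hsn hj, if_neg h]
      · rfl
    have hga1s : pvGA aux1 s j = v ∨ (pvGA aux1 s j = 0 ∧ v ≤ cur) := by
      rw [haux1]
      split_ifs with h2
      · exact Or.inr ⟨by rw [pvGA_set n aux hsh s j hsn hj, if_pos ⟨rfl, rfl⟩], h2⟩
      · exact Or.inl rfl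
    have hcongr1 : ∀ (a b' : Nat), s < a → pvMinOn (fun u => pvGA aux1 u j) a b' =
        pvMinOn (fun u => pvGA aux u j) a b' := by
      intro a b' ha
      rcases Nat.lt_or_ge b' a with hab | hab
      · rw [pvMinOn_base _ _ _ (by omega), pvMinOn_base _ _ _ (by omega)]
        exact hga1 a j (by omega)
      · exact pvMinOn_congr _ _ b' a hab (fun t h1 h2 => hga1 t j (by omega))
    have hminsplit : ∀ k, s < k → min (min cur v) (pvMinOn (fun u => pvGA aux1 u j) (s + 1) k) =
        min cur (pvMinOn (fun u => pvGA aux u j) s k) := by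
      intro k hk
      rw [hcongr1 (s + 1) k (by omega), pvMinOn_succ_left _ s k hk, ← min_assoc]
    obtain ⟨C1, C2, C3, C4, C5, C6⟩ := ih (s + 1) aux1 (min cur v)
      (max res (((s : Int) - (i : Int) + 1) * min cur v)) hsh1 (by omega) (by omega)
    refine ⟨C1, ?_, ?_, ?_, ?_, ?_⟩
    · -- untouched cells
      intro t j' h
      rw [C2 t j' (by omega)]
      exact hga1 t j' (by omega)
    · -- zero provenance
      intro t h1 h2
      rcases Nat.eq_or_lt_of_le h1 with h3 | h3
      · -- t = s
        subst h3
        rw [C2 s j (by omega)]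
        rcases hga1s with h4 | h4
        · exact Or.inl h4
        · exact Or.inr ⟨h4.1, h4.2, by omega⟩
      · -- t > s
        rcases C3 t (by omega) (by omega) with h4 | h4
        · rw [h4, hga1 t j (by omega)]
          exact Or.inl rfl
        · refine Or.inr ⟨h4.1, ?_, ?_⟩
          · have := h4.2.1
            rw [hga1 t j (by omega)] at this
            exact le_trans this (min_le_left _ _)
          · intro _
            have hb1 := h4.2.1
            rw [hga1 t j (by omega)] at hb1
            rcases Nat.eq_or_lt_of_le h3 with h5 | h5
            · simp only [pvMinOn_base (fun u => pvGA aux u j) s (t - 1) (by omega)]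
              exact le_trans hb1 (min_le_right _ _)
            · have hb2 := h4.2.2 (by omega)
              rw [hga1 t j (by omega), hcongr1 (s + 1) (t - 1) (by omega)] at hb2
              rw [pvMinOn_succ_left _ s (t - 1) (by omega)]
              refine le_min ?_ ?_
              · rw [← hv]
                exact le_trans hb1 (min_le_right _ _)
              · have : s + 1 = s + 1 := rfl
                exact hb2
    · -- res grows
      exact le_trans (le_max_left _ _) C4
    · -- candidates are covered
      intro k h1 h2
      rcases Nat.eq_or_lt_of_le h1 with h3 | h3
      · subst h3
        simp only [pvMinOn_base (fun u => pvGA aux u j) s s le_rfl]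
        exact le_trans (le_max_right _ _) C4
      · have := C5 k (by omega) (by omega)
        rw [hminsplit k h3] at this
        exact this
    · -- upper bound
      intro b hb hcand
      apply C6 b
      · refine max_le hb ?_
        have := hcand s le_rfl (by omega)
        simp only [pvMinOn_base (fun u => pvGA aux u j) s s le_rfl] at this
        exact this
      · intro k h1 h2
        rw [hminsplit k (by omega)]
        exact hcand k (by omega) (by omega)

-- characterisation of one row pass (the `for j in range(n)` loop at row i) of A's second phase
theorem pvJLoop (n i : Nat) (hi : i < n) :
    ∀ (q j0 : Nat) (aux : List (List Int)) (res : Int), pvSh n aux → j0 + q ≤ n →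
    (∀ t j', 0 ≤ pvGA aux t j') →
    pvSh n ((List.range' j0 q).foldl (pvJStep n i) (aux, res)).1
    ∧ (∀ t j', ¬ (i < t ∧ t < n ∧ j0 ≤ j' ∧ j' < j0 + q) →
        pvGA ((List.range' j0 q).foldl (pvJStep n i) (aux, res)).1 t j' = pvGA aux t j')
    ∧ (∀ t j', pvGA ((List.range' j0 q).foldl (pvJStep n i) (aux, res)).1 t j' = pvGA aux t j' ∨
        (pvGA ((List.range' j0 q).foldl (pvJStep n i) (aux, res)).1 t j' = 0 ∧ i < t ∧
          pvGA aux i j' ≠ 0 ∧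
          pvGA aux t j' ≤ pvMinOn (fun u => pvGA aux u j') i (t - 1)))
    ∧ res ≤ ((List.range' j0 q).foldl (pvJStep n i) (aux, res)).2
    ∧ (∀ j', j0 ≤ j' → j' < j0 + q → pvGA aux i j' ≠ 0 → ∀ k, i < k → k < n →
        ((k : Int) - (i : Int) + 1) * pvMinOn (fun u => pvGA aux u j') i k ≤
          ((List.range' j0 q).foldl (pvJStep n i) (aux, res)).2)
    ∧ (∀ b, res ≤ b →
        (∀ j' k, j0 ≤ j' → j' < j0 + q → pvGA aux i j' ≠ 0 → i < k → k < n →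
          ((k : Int) - (i : Int) + 1) * pvMinOn (fun u => pvGA aux u j') i k ≤ b) →
        ((List.range' j0 q).foldl (pvJStep n i) (aux, res)).2 ≤ b) := by
  intro q
  induction q with
  | zero =>
    intro j0 aux res hsh hq hnn
    exact ⟨hsh, fun t j' _ => rfl, fun t j' => Or.inl rfl, le_rfl, fun j' h1 h2 => by omega,
      fun b hb _ => hb⟩
  | succ q ih =>
    intro j0 aux res hsh hq hnn
    rw [List.range'_succ, List.foldl_cons]
    have hj0 : j0 < n := by omega
    by_cases hnx : pvGA aux i j0 ≠ 0
    · -- the k-loop runs for column j0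
      have hstep : pvJStep n i (aux, res) j0 =
          (((List.range' (i + 1) (n - (i + 1))).foldl (pvKStep i j0) (aux, pvGA aux i j0, res)).1,
           ((List.range' (i + 1) (n - (i + 1))).foldl (pvKStep i j0) (aux, pvGA aux i j0, res)).2.2) := by
        simp only [pvJStep]
        rw [if_pos (show pvGetI (pvRow aux i) j0 ≠ 0 from hnx)]
        rfl
      rw [hstep]
      obtain ⟨K1, K2, K3, K4, K5, K6⟩ :=
        pvKLoop n i j0 hj0 (n - (i + 1)) (i + 1) aux (pvGA aux i j0) res hsh (by omega) (by omega)
      set aux1 := ((List.range' (i + 1) (n - (i + 1))).foldl (pvKStep i j0) (aux, pvGA aux i j0, res)).1 with haux1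
      set res1 := ((List.range' (i + 1) (n - (i + 1))).foldl (pvKStep i j0) (aux, pvGA aux i j0, res)).2.2 with hres1
      -- every cell of aux1 is the old value or 0
      have hall1 : ∀ t j', pvGA aux1 t j' = pvGA aux t j' ∨ pvGA aux1 t j' = 0 := by
        intro t j'
        by_cases hin : i + 1 ≤ t ∧ t < i + 1 + (n - (i + 1)) ∧ j' = j0
        · rcases hin with ⟨ha, hb, rfl⟩
          rcases K3 t ha hb with h | h
          · exact Or.inl h
          · exact Or.inr h.1
        · exact Or.inl (K2 t j' hin)
      have hnn1 : ∀ t j', 0 ≤ pvGA aux1 t j' := by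
        intro t j'
        rcases hall1 t j' with h | h
        · rw [h]; exact hnn t j'
        · rw [h]
      have hle1 : ∀ t j', pvGA aux1 t j' ≤ pvGA aux t j' := by
        intro t j'
        rcases hall1 t j' with h | h
        · rw [h]
        · rw [h]; exact hnn t j'
      have hrow1 : ∀ j', pvGA aux1 i j' = pvGA aux i j' := fun j' => K2 i j' (by omega)
      have hcolne : ∀ j', j' ≠ j0 → ∀ t, pvGA aux1 t j' = pvGA aux t j' := by
        intro j' hne t
        exact K2 t j' (by tauto)
      -- zero provenance for aux1 over aux (column j0)
      have hzero1 : ∀ t, pvGA aux1 t j0 = 0 → pvGA aux t j0 ≠ 0 → i < t ∧ t < n ∧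
          pvGA aux t j0 ≤ pvMinOn (fun u => pvGA aux u j0) i (t - 1) := by
        intro t hz hne
        by_cases hin : i + 1 ≤ t ∧ t < i + 1 + (n - (i + 1))
        · rcases K3 t hin.1 hin.2 with h | h
          · rw [h] at hz; exact absurd hz hne
          · refine ⟨by omega, by omega, ?_⟩
            rcases Nat.eq_or_lt_of_le hin.1 with h5 | h5
            · simp only [pvMinOn_base (fun u => pvGA aux u j0) i (t - 1) (by omega)]
              have : t - 1 = i := by omega
              exact h.2.1
            · rw [pvMinOn_succ_left _ i (t - 1) (by omega)]
              exact le_min h.2.1 (h.2.2 (by omega))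
        · rw [K2 t j0 (by tauto)] at hz
          exact absurd hz hne
      obtain ⟨C1, C2, C3, C4, C5, C6⟩ := ih (j0 + 1) aux1 res1 K1 (by omega) hnn1
      refine ⟨C1, ?_, ?_, ?_, ?_, ?_⟩
      · -- untouched cells
        intro t j' h
        rw [C2 t j' (by omega)]
        by_cases hje : j' = j0
        · subst hje
          exact K2 t j' (by omega)
        · exact hcolne j' hje t
      · -- zero provenance
        intro t j'
        rcases C3 t j' with h | h
        · -- unchanged by the later columns
          by_cases hje : j' = j0
          · subst hje
            rcases hall1 t j' with h2 | h2
            · exact Or.inl (by rw [h, h2])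
            · by_cases hne : pvGA aux t j' = 0
              · exact Or.inl (by rw [h, h2, hne])
              · obtain ⟨p1, p2, p3⟩ := hzero1 t h2 hne
                exact Or.inr ⟨by rw [h, h2], p1, hnx, p3⟩
          · exact Or.inl (by rw [h, hcolne j' hje t])
        · -- zeroed while processing a later column j' > j0
          obtain ⟨h1, h2, h3, h4⟩ := h
          rw [hrow1 j'] at h3
          by_cases hje : j' = j0
          · -- impossible: the later columns do not touch column j0, so aux1 value was kept
            subst hje
            rcases hall1 t j' with h5 | h5
            · refine Or.inr ⟨h1, h2, h3, ?_⟩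
              rw [← h5]
              exact le_trans h4 (pvMinOn_mono _ _ i (t - 1) (by omega)
                (fun u _ _ => hle1 u j'))
            · by_cases hne : pvGA aux t j' = 0
              · exact Or.inl (by rw [h1, hne])
              · obtain ⟨p1, p2, p3⟩ := hzero1 t h5 hne
                exact Or.inr ⟨h1, p1, h3, p3⟩
          · refine Or.inr ⟨h1, h2, h3, ?_⟩
            have : pvMinOn (fun u => pvGA aux1 u j') i (t - 1) =
                pvMinOn (fun u => pvGA aux u j') i (t - 1) := by
              rcases Nat.lt_or_ge (t - 1) i with hti | hti
              · rw [pvMinOn_base _ _ _ (by omega), pvMinOn_base _ _ _ (by omega)]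
                exact hcolne j' hje i
              · exact pvMinOn_congr _ _ (t - 1) i hti (fun u _ _ => hcolne j' hje u)
            rw [this] at h4
            rw [← hcolne j' hje t]
            exact h4
      · -- res grows
        exact le_trans K4 C4
      · -- candidates
        intro j' hj1 hj2 hne k hk1 hk2
        by_cases hje : j' = j0
        · subst hje
          have := K5 k (by omega) (by omega)
          have heq : min (pvGA aux i j') (pvMinOn (fun u => pvGA aux u j') (i + 1) k) =
              pvMinOn (fun u => pvGA aux u j') i k := by
            rw [pvMinOn_succ_left _ i k (by omega)]
          rw [heq] at this
          exact le_trans this C4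
        · have hcol : pvMinOn (fun u => pvGA aux1 u j') i k =
              pvMinOn (fun u => pvGA aux u j') i k :=
            pvMinOn_congr _ _ k i (by omega) (fun u _ _ => hcolne j' hje u)
          have := C5 j' (by omega) (by omega) (by rw [hrow1 j']; exact hne) k hk1 hk2
          rw [hcol] at this
          exact this
      · -- upper bound
        intro b hb hcand
        apply C6 b
        · apply K6 b hb
          intro k h1 h2
          have heq : min (pvGA aux i j0) (pvMinOn (fun u => pvGA aux u j0) (i + 1) k) =
              pvMinOn (fun u => pvGA aux u j0) i k := by
            rw [pvMinOn_succ_left _ i k (by omega)]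
          rw [heq]
          exact hcand j0 k le_rfl (by omega) hnx (by omega) (by omega)
        · intro j' k hj1 hj2 hne hk1 hk2
          by_cases hje : j' = j0
          · omega
          · have hcol : pvMinOn (fun u => pvGA aux1 u j') i k =
                pvMinOn (fun u => pvGA aux u j') i k :=
              pvMinOn_congr _ _ k i (by omega) (fun u _ _ => hcolne j' hje u)
            rw [hcol]
            rw [hrow1 j'] at hne
            exact hcand j' k (by omega) (by omega) hne hk1 hk2
    · -- nx = 0: this column is skipped
      have hstep : pvJStep n i (aux, res) j0 = (aux, res) := by
        simp only [pvJStep]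
        rw [if_neg (show ¬ pvGetI (pvRow aux i) j0 ≠ 0 from hnx)]
      rw [hstep]
      obtain ⟨C1, C2, C3, C4, C5, C6⟩ := ih (j0 + 1) aux res hsh (by omega) hnn
      refine ⟨C1, ?_, C3, C4, ?_, ?_⟩
      · intro t j' h
        exact C2 t j' (by omega)
      · intro j' hj1 hj2 hne k hk1 hk2
        rcases Nat.eq_or_lt_of_le hj1 with h | h
        · exact absurd hne (h ▸ hnx)
        · exact C5 j' (by omega) (by omega) hne k hk1 hk2
      · intro b hb hcand
        exact C6 b hb (fun j' k h1 h2 hne hk1 hk2 => hcand j' k (by omega) (by omega) hne hk1 hk2)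

-- ---- the width array and the flattened maximum ----
def pvWf (slice : List (List Bool)) (n t j : Nat) : Int := pvGA (pvAux slice n) t j

theorem pvSh_aux0 (slice : List (List Bool)) (n : Nat) : pvSh n (pvAux slice n) := by
  constructor
  · simp [pvAux]
  · intro r hr
    rw [pvAux] at hr
    rcases List.mem_map.mp hr with ⟨i, _, hi⟩
    rw [← hi]
    simp

theorem pvWf_eval (slice : List (List Bool)) (n t j : Nat) (ht : t < n) (hj : j < n) :
    pvWf slice n t j = (pvGw (pvRowB slice t) n j : Int) := by
  rw [pvWf, pvGA, pvRow, pvAux, pvGetD_map_range _ n t _ ht, pvGetI,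
    pvGetD_map_range _ n j _ hj, pvWhile_eq]
  simp

theorem pvWf_out (slice : List (List Bool)) (n t j : Nat) (h : n ≤ t ∨ n ≤ j) :
    pvWf slice n t j = 0 := by
  rcases h with h | h
  · rw [pvWf, pvGA, pvRow, List.getD, List.getElem?_eq_none (by simp [pvAux]; omega)]
    rfl
  · rcases Nat.lt_or_ge t n with ht | ht
    · rw [pvWf, pvGA, pvRow, pvAux, pvGetD_map_range _ n t _ ht, pvGetI, List.getD,
        List.getElem?_eq_none (by simp; omega)]
      rfl
    · rw [pvWf, pvGA, pvRow, List.getD, List.getElem?_eq_none (by simp [pvAux]; omega)]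
      rfl

theorem pvWf_nonneg (slice : List (List Bool)) (n t j : Nat) : 0 ≤ pvWf slice n t j := by
  rcases Nat.lt_or_ge t n with ht | ht
  · rcases Nat.lt_or_ge j n with hj | hj
    · rw [pvWf_eval slice n t j ht hj]; positivity
    · rw [pvWf_out slice n t j (Or.inr hj)]
  · rw [pvWf_out slice n t j (Or.inl ht)]

theorem pvMaxFlat_char (slice : List (List Bool)) (n : Nat) (hn : 1 ≤ n) :
    (∀ t j, t < n → j < n → pvWf slice n t j ≤ pvMaxFlat (pvAux slice n)) ∧
    (∃ t j, t < n ∧ j < n ∧ pvMaxFlat (pvAux slice n) = pvWf slice n t j) := by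
  have hmem : ∀ v, v ∈ (pvAux slice n).flatMap id ↔
      ∃ t j, t < n ∧ j < n ∧ v = pvWf slice n t j := by
    intro v
    constructor
    · intro hv
      rcases List.mem_flatMap.mp hv with ⟨row, hrow, hvrow⟩
      rcases List.mem_map.mp hrow with ⟨t, ht, hteq⟩
      rw [← hteq] at hvrow
      simp only [id] at hvrow
      rcases List.mem_map.mp hvrow with ⟨j, hj, hjeq⟩
      refine ⟨t, j, List.mem_range.mp ht, List.mem_range.mp hj, ?_⟩
      rw [← hjeq, pvWf_eval slice n t j (List.mem_range.mp ht) (List.mem_range.mp hj),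
        pvWhile_eq]
      simp
    · rintro ⟨t, j, ht, hj, rfl⟩
      apply List.mem_flatMap.mpr
      refine ⟨(List.range n).map (fun j => pvWhile (pvRowB slice t) n j 0), ?_, ?_⟩
      · exact List.mem_map.mpr ⟨t, List.mem_range.mpr ht, rfl⟩
      · simp only [id]
        apply List.mem_map.mpr
        refine ⟨j, List.mem_range.mpr hj, ?_⟩
        rw [pvWhile_eq, pvWf_eval slice n t j ht hj]
        simp
  have hne : (pvAux slice n).flatMap id ≠ [] := by
    apply List.ne_nil_of_mem ((hmem (pvWf slice n 0 0)).mpr ⟨0, 0, by omega, by omega, rfl⟩)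
  have hmax : ∃ m, ((pvAux slice n).flatMap id).max? = some m ∧ m ∈ (pvAux slice n).flatMap id ∧
      ∀ v ∈ (pvAux slice n).flatMap id, v ≤ m := by
    cases hm : ((pvAux slice n).flatMap id).max? with
    | none => rw [List.max?_eq_none_iff] at hm; exact absurd hm hne
    | some m => exact ⟨m, rfl, (List.max?_eq_some_iff.mp hm).1, (List.max?_eq_some_iff.mp hm).2⟩
  rcases hmax with ⟨m, hm1, hm2, hm3⟩
  have : pvMaxFlat (pvAux slice n) = m := by rw [pvMaxFlat, hm1]; rfl
  rw [this]
  constructor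
  · intro t j ht hj
    exact hm3 _ ((hmem _).mpr ⟨t, j, ht, hj, rfl⟩)
  · rcases (hmem m).mp hm2 with ⟨t, j, ht, hj, hv⟩
    exact ⟨t, j, ht, hj, hv⟩

-- ---- phase-2 outer loop ----
theorem pvILoop_mono (n : Nat) : ∀ (m i : Nat) (aux : List (List Int)) (res : Int),
    i + m ≤ n → pvSh n aux → (∀ t j, 0 ≤ pvGA aux t j) →
    res ≤ ((List.range' i m).foldl (pvIStep n) (aux, res)).2 := by
  intro m
  induction m with
  | zero => intro i aux res _ _ _; exact le_rfl
  | succ m ih =>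
    intro i aux res hin hsh hnn
    rw [List.range'_succ, List.foldl_cons]
    have hi : i < n := by omega
    have histep : pvIStep n (aux, res) i = (List.range' 0 n).foldl (pvJStep n i) (aux, res) := by
      rw [pvIStep, List.range_eq_range']
    rw [histep]
    obtain ⟨J1, J2, J3, J4, J5, J6⟩ := pvJLoop n i hi n 0 aux res hsh (by omega) hnn
    set R := (List.range' 0 n).foldl (pvJStep n i) (aux, res) with hR
    have hnn1 : ∀ t j, 0 ≤ pvGA R.1 t j := by
      intro t j
      rcases J3 t j with h | h
      · rw [h]; exact hnn t j
      · rw [h.1]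
    calc res ≤ R.2 := J4
    _ ≤ _ := by
      have := ih (i + 1) R.1 R.2 (by omega) J1 hnn1
      exact this

theorem pvILoop_ge (slice : List (List Bool)) (n : Nat) :
    ∀ (m i : Nat) (aux : List (List Int)) (res : Int), i + m = n → pvSh n aux →
    (∀ t j, pvGA aux t j = pvWf slice n t j ∨ pvGA aux t j = 0) →
    ∀ i0 k0 j, i ≤ i0 → i0 ≤ k0 → k0 < n → j < n →
    ((k0 : Int) - (i0 : Int) + 1) * pvMinOn (fun u => pvGA aux u j) i0 k0 ≤
      max (((List.range' i m).foldl (pvIStep n) (aux, res)).2) (pvMaxFlat (pvAux slice n)) := by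
  intro m
  induction m with
  | zero => intro i aux res hin _ _ i0 k0 j h1 h2 h3 h4; omega
  | succ m ih =>
    intro i aux res hin hsh hinv i0 k0 j h1 h2 h3 h4
    have hi : i < n := by omega
    have hn : 1 ≤ n := by omega
    have hnn : ∀ t j', 0 ≤ pvGA aux t j' := by
      intro t j'
      rcases hinv t j' with h | h
      · rw [h]; exact pvWf_nonneg slice n t j'
      · rw [h]
    obtain ⟨hmf1, hmf2⟩ := pvMaxFlat_char slice n hn
    have hmf0 : 0 ≤ pvMaxFlat (pvAux slice n) := by
      rcases hmf2 with ⟨t, j', _, _, hv⟩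
      rw [hv]
      exact pvWf_nonneg slice n t j'
    rw [List.range'_succ, List.foldl_cons]
    have histep : pvIStep n (aux, res) i = (List.range' 0 n).foldl (pvJStep n i) (aux, res) := by
      rw [pvIStep, List.range_eq_range']
    rw [histep]
    obtain ⟨J1, J2, J3, J4, J5, J6⟩ := pvJLoop n i hi n 0 aux res hsh (by omega) hnn
    set R := (List.range' 0 n).foldl (pvJStep n i) (aux, res) with hR
    have hinv1 : ∀ t j', pvGA R.1 t j' = pvWf slice n t j' ∨ pvGA R.1 t j' = 0 := by
      intro t j'
      rcases J3 t j' with h | h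
      · rw [h]; exact hinv t j'
      · exact Or.inr h.1
    have hnn1 : ∀ t j', 0 ≤ pvGA R.1 t j' := by
      intro t j'
      rcases hinv1 t j' with h | h
      · rw [h]; exact pvWf_nonneg slice n t j'
      · rw [h]
    have hmono : R.2 ≤ ((List.range' (i + 1) m).foldl (pvIStep n) R).2 :=
      pvILoop_mono n m (i + 1) R.1 R.2 (by omega) J1 hnn1
    rcases Nat.eq_or_lt_of_le h1 with hi0 | hi0
    · -- i0 = i
      subst hi0
      by_cases hz : pvGA aux i j = 0
      · have hmin0 : pvMinOn (fun u => pvGA aux u j) i k0 = 0 := by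
          apply le_antisymm
          · have := pvMinOn_le (fun u => pvGA aux u j) k0 i i le_rfl h2
            simpa [hz] using this
          · exact pvLe_minOn _ k0 0 i h2 (fun t _ _ => hnn t j)
        rw [hmin0, mul_zero]
        exact le_trans hmf0 (le_max_right _ _)
      · rcases Nat.eq_or_lt_of_le h2 with hk0 | hk0
        · -- single-row window: bounded by the flattened max
          subst hk0
          rw [pvMinOn_base _ _ _ le_rfl]
          have hWeq : pvGA aux i j = pvWf slice n i j := by
            rcases hinv i j with h | h
            · exact h
            · exact absurd h hz
          have hone : ((i : Int) - (i : Int) + 1) = 1 := by ring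
          rw [hone, one_mul, hWeq]
          exact le_trans (hmf1 i j h3 h4) (le_max_right _ _)
        · -- the pass at row i0 emits this candidate
          have := J5 j (by omega) (by omega) hz k0 hk0 h3
          exact le_trans (le_trans this hmono) (le_max_left _ _)
    · -- i0 > i
      by_cases hall : ∀ t, i0 ≤ t → t ≤ k0 → pvGA R.1 t j = pvGA aux t j
      · have hcong : pvMinOn (fun u => pvGA aux u j) i0 k0 =
            pvMinOn (fun u => pvGA R.1 u j) i0 k0 :=
          (pvMinOn_congr _ _ k0 i0 h2 (fun t ht1 ht2 => (hall t ht1 ht2).symm))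
        rw [hcong]
        exact ih (i + 1) R.1 R.2 (by omega) J1 hinv1 i0 k0 j (by omega) h2 h3 h4
      · push_neg at hall
        rcases hall with ⟨t, ht1, ht2, htne⟩
        rcases J3 t j with h | h
        · exact absurd h htne
        · obtain ⟨hz0, hit, hnx0, hbound⟩ := h
          have hdrop : pvMinOn (fun u => pvGA aux u j) i k0 =
              pvMinOn (fun u => pvGA aux u j) t k0 := by
            apply pvMinOn_drop _ i t k0 (by omega) (by omega)
            intro x hx1 hx2
            exact le_trans hbound (pvMinOn_le _ (t - 1) i x hx1 (by omega))
          have hmonoL : pvMinOn (fun u => pvGA aux u j) i0 k0 ≤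
              pvMinOn (fun u => pvGA aux u j) t k0 :=
            pvMinOn_mono_left _ i0 t k0 (by omega) (by omega)
          have hcand := J5 j (by omega) (by omega) hnx0 k0 (by omega) h3
          rw [← hdrop] at hmonoL
          have hstep : ((k0 : Int) - (i0 : Int) + 1) * pvMinOn (fun u => pvGA aux u j) i0 k0 ≤
              ((k0 : Int) - (i : Int) + 1) * pvMinOn (fun u => pvGA aux u j) i k0 := by
            apply mul_le_mul (by push_cast; omega) hmonoL
              (pvLe_minOn _ k0 0 i0 h2 (fun u _ _ => hnn u j)) ?_
            have : 0 ≤ pvMinOn (fun u => pvGA aux u j) i k0 := by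
              apply pvLe_minOn _ k0 0 i (by omega) (fun u _ _ => hnn u j)
            push_cast
            omega
          exact le_trans (le_trans hstep (le_trans hcand hmono)) (le_max_left _ _)

theorem pvILoop_le (slice : List (List Bool)) (n : Nat) :
    ∀ (m i : Nat) (aux : List (List Int)) (res : Int) (b : Int), i + m ≤ n → pvSh n aux →
    (∀ t j, pvGA aux t j ≤ pvWf slice n t j) → (∀ t j, 0 ≤ pvGA aux t j) → res ≤ b →
    (∀ j i0 k0, j < n → i ≤ i0 → i0 ≤ k0 → k0 < n →
      ((k0 : Int) - (i0 : Int) + 1) * pvMinOn (fun u => pvWf slice n u j) i0 k0 ≤ b) →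
    ((List.range' i m).foldl (pvIStep n) (aux, res)).2 ≤ b := by
  intro m
  induction m with
  | zero => intro i aux res b _ _ _ _ hres _; exact hres
  | succ m ih =>
    intro i aux res b hin hsh hwle hnn hres hcand
    have hi : i < n := by omega
    rw [List.range'_succ, List.foldl_cons]
    have histep : pvIStep n (aux, res) i = (List.range' 0 n).foldl (pvJStep n i) (aux, res) := by
      rw [pvIStep, List.range_eq_range']
    rw [histep]
    obtain ⟨J1, J2, J3, J4, J5, J6⟩ := pvJLoop n i hi n 0 aux res hsh (by omega) hnn
    set R := (List.range' 0 n).foldl (pvJStep n i) (aux, res) with hR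
    have hwle1 : ∀ t j, pvGA R.1 t j ≤ pvWf slice n t j := by
      intro t j
      rcases J3 t j with h | h
      · rw [h]; exact hwle t j
      · rw [h.1]; exact pvWf_nonneg slice n t j
    have hnn1 : ∀ t j, 0 ≤ pvGA R.1 t j := by
      intro t j
      rcases J3 t j with h | h
      · rw [h]; exact hnn t j
      · rw [h.1]
    have hR2 : R.2 ≤ b := by
      apply J6 b hres
      intro j k hj1 hj2 hne hk1 hk2
      calc ((k : Int) - (i : Int) + 1) * pvMinOn (fun u => pvGA aux u j) i k
          ≤ ((k : Int) - (i : Int) + 1) * pvMinOn (fun u => pvWf slice n u j) i k := by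
            apply mul_le_mul_of_nonneg_left
              (pvMinOn_mono _ _ i k (by omega) (fun u _ _ => hwle u j)) (by push_cast; omega)
        _ ≤ b := hcand j i k (by omega) le_rfl (by omega) hk2
    exact ih (i + 1) R.1 R.2 b (by omega) J1 hwle1 hnn1 hR2
      (fun j i0 k0 hj h1 h2 h3 => hcand j i0 k0 hj (by omega) h2 h3)

-- ---- find_largest_rectangle equals the window supremum ----
def pvWinVal (slice : List (List Bool)) (n j i0 k0 : Nat) : Int :=
  ((k0 : Int) - (i0 : Int) + 1) * pvMinOn (fun u => pvWf slice n u j) i0 k0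

def pvSupWin (slice : List (List Bool)) (n : Nat) : Int :=
  pvMaxOn (fun j => pvMaxOn (fun i0 =>
    pvMaxOn (fun k0 => pvWinVal slice n j i0 k0) i0 (n - 1)) 0 (n - 1)) 0 (n - 1)

theorem pvWinVal_le_sup (slice : List (List Bool)) (n : Nat) (j i0 k0 : Nat) (hj : j < n)
    (h1 : i0 ≤ k0) (h2 : k0 < n) : pvWinVal slice n j i0 k0 ≤ pvSupWin slice n := by
  calc pvWinVal slice n j i0 k0
      ≤ pvMaxOn (fun k0 => pvWinVal slice n j i0 k0) i0 (n - 1) :=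
        pvLe_maxOn _ (n - 1) i0 k0 h1 (by omega)
    _ ≤ pvMaxOn (fun i0 => pvMaxOn (fun k0 => pvWinVal slice n j i0 k0) i0 (n - 1)) 0 (n - 1) :=
        pvLe_maxOn _ (n - 1) 0 i0 (by omega) (by omega)
    _ ≤ pvSupWin slice n := pvLe_maxOn _ (n - 1) 0 j (by omega) (by omega)

theorem pvSupWin_attain (slice : List (List Bool)) (n : Nat) (hn : 1 ≤ n) :
    ∃ j i0 k0, j < n ∧ i0 ≤ k0 ∧ k0 < n ∧ pvSupWin slice n = pvWinVal slice n j i0 k0 := by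
  rcases pvMaxOn_attain' (fun j => pvMaxOn (fun i0 =>
      pvMaxOn (fun k0 => pvWinVal slice n j i0 k0) i0 (n - 1)) 0 (n - 1)) 0 (n - 1)
      (by omega) with ⟨j, _, hj2, hj3⟩
  rcases pvMaxOn_attain' (fun i0 =>
      pvMaxOn (fun k0 => pvWinVal slice n j i0 k0) i0 (n - 1)) 0 (n - 1) (by omega)
      with ⟨i0, _, hi2, hi3⟩
  rcases pvMaxOn_attain' (fun k0 => pvWinVal slice n j i0 k0) i0 (n - 1) (by omega)
      with ⟨k0, hk1, hk2, hk3⟩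
  exact ⟨j, i0, k0, by omega, hk1, by omega, by rw [pvSupWin, hj3, hi3, hk3]⟩

theorem pvFLR_eq (slice : List (List Bool)) (n : Nat) (hn : 1 ≤ n) :
    pvFLR slice n = pvSupWin slice n := by
  have hWG : (∀ j, (fun u => pvWf slice n u j) = (fun u => pvGA (pvAux slice n) u j)) :=
    fun j => rfl
  have hFLR : pvFLR slice n =
      ((List.range' 0 n).foldl (pvIStep n) (pvAux slice n, pvMaxFlat (pvAux slice n))).2 := by
    rw [pvFLR, List.range_eq_range']
  obtain ⟨hmf1, hmf2⟩ := pvMaxFlat_char slice n hn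
  have hsh0 := pvSh_aux0 slice n
  have hnn0 : ∀ t j, 0 ≤ pvGA (pvAux slice n) t j := fun t j => pvWf_nonneg slice n t j
  apply le_antisymm
  · -- easy direction: every candidate is a window value
    rw [hFLR]
    apply pvILoop_le slice n n 0 (pvAux slice n) (pvMaxFlat (pvAux slice n)) (pvSupWin slice n)
      (by omega) hsh0 (fun t j => le_rfl) hnn0
    · -- the initial res (the flattened max) is a 1×w window value
      rcases hmf2 with ⟨t, j, ht, hj, hv⟩
      rw [hv]
      have : pvWf slice n t j = pvWinVal slice n j t t := by
        rw [pvWinVal, pvMinOn_base _ _ _ le_rfl]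
        push_cast
        ring
      rw [this]
      exact pvWinVal_le_sup slice n j t t hj le_rfl ht
    · intro j i0 k0 hj _ h2 h3
      exact pvWinVal_le_sup slice n j i0 k0 hj h2 h3
  · -- hard direction: the supremum is attained and every window value is covered
    rcases pvSupWin_attain slice n hn with ⟨j, i0, k0, hj, h1, h2, hsup⟩
    rw [hsup, hFLR]
    have := pvILoop_ge slice n n 0 (pvAux slice n) (pvMaxFlat (pvAux slice n)) (by omega) hsh0
      (fun t j => Or.inl rfl) i0 k0 j (by omega) h1 h2 hj
    have hmono := pvILoop_mono n n 0 (pvAux slice n) (pvMaxFlat (pvAux slice n)) (by omega)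
      hsh0 hnn0
    rw [max_eq_left hmono] at this
    rw [pvWinVal, hWG j]
    exact this

-- ---- top level of A ----
def pvD (d : List (List Int)) (y x : Nat) : Int := pvGetI (pvRow d y) x

def pvCellVal (d : List (List Int)) (n y x : Nat) : Int :=
  pvFLR (pvSlice d n (pvD d y x)) n * pvD d y x

theorem pvA_fold (d : List (List Int)) :
    largest_cuboid d = (List.range d.length).foldl (fun cm y =>
      (List.range d.length).foldl (fun cm x => max cm (pvCellVal d d.length y x)) cm) 0 := by
  simp only [largest_cuboid, pvIfMax]
  rfl

theorem pvA_nonneg (d : List (List Int)) : 0 ≤ largest_cuboid d := by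
  rw [pvA_fold]
  apply pvFoldl_inc_init
  intro x y _
  apply pvFoldl_inc_init
  intro a t _
  exact le_max_left _ _

theorem pvA_ge (d : List (List Int)) (y x : Nat) (hy : y < d.length) (hx : x < d.length) :
    pvCellVal d d.length y x ≤ largest_cuboid d := by
  rw [pvA_fold]
  refine pvFoldl_inc_ge _ y _ _ _ ?_ (List.mem_range.mpr hy) ?_
  · intro a t _
    exact pvFoldl_inc_init _ _ _ (fun a' t' _ => le_max_left _ _)
  · intro a
    refine pvFoldl_inc_ge _ x _ _ _ ?_ (List.mem_range.mpr hx) ?_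
    · intro a' t' _
      exact le_max_left _ _
    · intro a'
      exact le_max_right _ _

theorem pvA_le (d : List (List Int)) (b : Int) (hb : 0 ≤ b)
    (h : ∀ y x, y < d.length → x < d.length → pvCellVal d d.length y x ≤ b) :
    largest_cuboid d ≤ b := by
  rw [pvA_fold]
  apply pvFoldl_inc_le _ _ _ _ hb
  intro a y hy ha
  apply pvFoldl_inc_le _ _ _ _ ha
  intro a' x hx ha'
  exact max_le ha' (h y x (List.mem_range.mp hy) (List.mem_range.mp hx))

-- ---- top level of B ----
def pvRectMin (d : List (List Int)) (i k j l : Nat) : Int :=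
  pvMinOn (fun x => pvMinOn (fun t => pvD d t x) i k) j l

def pvVol (d : List (List Int)) (i k j l : Nat) : Int :=
  ((k : Int) - (i : Int) + 1) * (((l : Int) - (j : Int) + 1) * pvRectMin d i k j l)

-- the innermost `for l in range(j, n)` loop of B
theorem pvBL (n : Nat) (h : Int) (colmin : List Int) (j : Nat) :
    ∀ (q s : Nat) (m0 best : Int), j ≤ s → s + q ≤ n →
    m0 = pvMinOn (fun u => pvGetI colmin u) j (s - 1) →
    best ≤ ((List.range' s q).foldl (pvBLStep h j colmin) (m0, best)).2
    ∧ (∀ l, s ≤ l → l < s + q →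
        h * (((l : Int) - (j : Int) + 1) * pvMinOn (fun u => pvGetI colmin u) j l) ≤
          ((List.range' s q).foldl (pvBLStep h j colmin) (m0, best)).2)
    ∧ (∀ b, best ≤ b →
        (∀ l, s ≤ l → l < s + q →
          h * (((l : Int) - (j : Int) + 1) * pvMinOn (fun u => pvGetI colmin u) j l) ≤ b) →
        ((List.range' s q).foldl (pvBLStep h j colmin) (m0, best)).2 ≤ b) := by
  intro q
  induction q with
  | zero =>
    intro s m0 best _ _ _
    exact ⟨le_rfl, fun l h1 h2 => by omega, fun b hb _ => hb⟩
  | succ q ih =>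
    intro s m0 best hjs hsq hm0
    rw [List.range'_succ, List.foldl_cons]
    have hstep : pvBLStep h j colmin (m0, best) s =
        (min m0 (pvGetI colmin s),
         max best (h * (((s : Int) - (j : Int) + 1) * min m0 (pvGetI colmin s)))) := by
      simp only [pvBLStep, pvIfMin, pvIfMax]
      ring_nf
    rw [hstep]
    have hm1 : min m0 (pvGetI colmin s) = pvMinOn (fun u => pvGetI colmin u) j s := by
      rcases Nat.eq_or_lt_of_le hjs with hq | hq
    -- s = j
      · subst hq
        rw [hm0, pvMinOn_base _ _ _ (by omega), pvMinOn_base _ _ _ (by omega), min_self]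
      · rw [hm0]
        have : s - 1 + 1 = s := by omega
        rw [← this, pvMinOn_succ_right _ (s - 1) j (by omega), this]
    rw [hm1]
    obtain ⟨C1, C2, C3⟩ := ih (s + 1)
      (pvMinOn (fun u => pvGetI colmin u) j s)
      (max best (h * (((s : Int) - (j : Int) + 1) * pvMinOn (fun u => pvGetI colmin u) j s)))
      (by omega) (by omega) (by rw [Nat.add_sub_cancel])
    refine ⟨le_trans (le_max_left _ _) C1, ?_, ?_⟩
    · intro l h1 h2
      rcases Nat.eq_or_lt_of_le h1 with h3 | h3
      · subst h3
        exact le_trans (le_max_right _ _) C1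
      · exact C2 l (by omega) (by omega)
    · intro b hb hcand
      apply C3 b
      · exact max_le hb (hcand s le_rfl (by omega))
      · intro l h1 h2
        exact hcand l (by omega) (by omega)

-- the `for k in range(i, n)` strip loop of B
theorem pvBStrip (d : List (List Int)) (n i : Nat) (hi : i < n) :
    ∀ (q s : Nat) (cm : List Int) (best : Int), i ≤ s → s + q ≤ n →
    (∀ j, j < n → pvGetI cm j = pvMinOn (fun t => pvD d t j) i (s - 1)) →
    best ≤ ((List.range' s q).foldl (pvBKStep d n i) (cm, best)).2
    ∧ (∀ k, s ≤ k → k < s + q → ∀ j l, j ≤ l → l < n →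
        ((k : Int) - (i : Int) + 1) * (((l : Int) - (j : Int) + 1) * pvRectMin d i k j l) ≤
          ((List.range' s q).foldl (pvBKStep d n i) (cm, best)).2)
    ∧ (∀ b, best ≤ b →
        (∀ k, s ≤ k → k < s + q → ∀ j l, j ≤ l → l < n →
          ((k : Int) - (i : Int) + 1) * (((l : Int) - (j : Int) + 1) * pvRectMin d i k j l) ≤ b) →
        ((List.range' s q).foldl (pvBKStep d n i) (cm, best)).2 ≤ b) := by
  intro q
  induction q with
  | zero =>
    intro s cm best _ _ _
    exact ⟨le_rfl, fun k h1 h2 => by omega, fun b hb _ => hb⟩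
  | succ q ih =>
    intro s cm best his hsq hcm
    rw [List.range'_succ, List.foldl_cons]
    -- the updated column minima
    set cm1 := (if i < s then
        (List.range n).map (fun j => min (pvGetI cm j) (pvGetI (pvRow d s) j))
      else cm) with hcm1def
    have hstep : pvBKStep d n i (cm, best) s =
        (cm1, (List.range n).foldl
          (pvBJStep n ((s : Int) - (i : Int) + 1) cm1) best) := by
      simp only [pvBKStep, hcm1def]
    rw [hstep]
    have hcm1 : ∀ j, j < n → pvGetI cm1 j = pvMinOn (fun t => pvD d t j) i s := by
      intro j hj
      rw [hcm1def]
      rcases Nat.eq_or_lt_of_le his with hq | hq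
      · subst hq
        rw [if_neg (by omega), hcm j hj, pvMinOn_base _ _ _ (by omega),
          pvMinOn_base _ _ _ (by omega)]
      · rw [if_pos hq, pvGetI, pvGetD_map_range _ n j _ hj, hcm j hj]
        have : s - 1 + 1 = s := by omega
        rw [← this, pvMinOn_succ_right _ (s - 1) i (by omega), this]
        rfl
    -- facts about the j-loop at strip (i, s)
    have hjge : ∀ (a : Int) (j : Nat), a ≤ pvBJStep n ((s : Int) - (i : Int) + 1) cm1 a j := by
      intro a j
      rcases Nat.lt_or_ge j n with hjn | hjn
      · exact (pvBL n _ cm1 j (n - j) j (pvGetI cm1 j) a le_rfl (by omega)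
          (by rw [pvMinOn_base _ _ _ (by omega)])).1
      · rw [pvBJStep]
        have : n - j = 0 := by omega
        rw [this]
        exact le_rfl
    have hjcand : ∀ (j l : Nat), j ≤ l → l < n → ∀ (a : Int),
        ((s : Int) - (i : Int) + 1) * (((l : Int) - (j : Int) + 1) * pvRectMin d i s j l) ≤
          pvBJStep n ((s : Int) - (i : Int) + 1) cm1 a j := by
      intro j l hjl hl a
      have hjn : j < n := by omega
      obtain ⟨B1, B2, B3⟩ := pvBL n ((s : Int) - (i : Int) + 1) cm1 j (n - j) j (pvGetI cm1 j) a
        le_rfl (by omega) (by rw [pvMinOn_base _ _ _ (by omega)])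
      have := B2 l hjl (by omega)
      have hcong : pvMinOn (fun u => pvGetI cm1 u) j l = pvRectMin d i s j l := by
        rw [pvRectMin]
        exact pvMinOn_congr _ _ l j hjl (fun u h1 h2 => hcm1 u (by omega))
      rw [hcong] at this
      exact this
    have hjle : ∀ (b : Int) (a : Int) (j : Nat), a ≤ b →
        (∀ l, j ≤ l → l < n →
          ((s : Int) - (i : Int) + 1) * (((l : Int) - (j : Int) + 1) * pvRectMin d i s j l) ≤ b) →
        pvBJStep n ((s : Int) - (i : Int) + 1) cm1 a j ≤ b := by
      intro b a j ha hc
      rcases Nat.lt_or_ge j n with hjn | hjn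
      · obtain ⟨B1, B2, B3⟩ := pvBL n ((s : Int) - (i : Int) + 1) cm1 j (n - j) j (pvGetI cm1 j) a
          le_rfl (by omega) (by rw [pvMinOn_base _ _ _ (by omega)])
        apply B3 b ha
        intro l h1 h2
        have hcong : pvMinOn (fun u => pvGetI cm1 u) j l = pvRectMin d i s j l := by
          rw [pvRectMin]
          exact pvMinOn_congr _ _ l j h1 (fun u hu1 hu2 => hcm1 u (by omega))
        rw [hcong]
        exact hc l h1 (by omega)
      · rw [pvBJStep]
        have : n - j = 0 := by omega
        rw [this]
        exact ha
    set best1 := (List.range n).foldl (pvBJStep n ((s : Int) - (i : Int) + 1) cm1) best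
      with hbest1
    have hb1 : best ≤ best1 := by
      rw [hbest1]
      exact pvFoldl_inc_init _ _ _ (fun a t _ => hjge a t)
    obtain ⟨C1, C2, C3⟩ := ih (s + 1) cm1 best1 (by omega) (by omega)
      (by intro j hj; rw [Nat.add_sub_cancel]; exact hcm1 j hj)
    refine ⟨le_trans hb1 C1, ?_, ?_⟩
    · intro k h1 h2 j l hjl hl
      rcases Nat.eq_or_lt_of_le h1 with h3 | h3
      · subst h3
        have hcd : ((s : Int) - (i : Int) + 1) * (((l : Int) - (j : Int) + 1) * pvRectMin d i s j l) ≤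
            best1 := by
          rw [hbest1]
          exact pvFoldl_inc_ge _ j _ _ _ (fun a t _ => hjge a t)
            (List.mem_range.mpr (by omega)) (hjcand j l hjl hl)
        exact le_trans hcd C1
      · exact C2 k (by omega) (by omega) j l hjl hl
    · intro b hb hcand
      apply C3 b
      · rw [hbest1]
        apply pvFoldl_inc_le _ _ _ _ hb
        intro a j hj ha
        exact hjle b a j ha (fun l h1 h2 => hcand s le_rfl (by omega) j l h1 h2)
      · intro k h1 h2 j l hjl hl
        exact hcand k (by omega) (by omega) j l hjl hl

theorem pvB_fold (d : List (List Int)) :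
    largest_cuboid_alt d = (List.range d.length).foldl (fun best i =>
      ((List.range' i (d.length - i)).foldl (pvBKStep d d.length i)
        ((List.range d.length).map (fun j => pvGetI (pvRow d i) j), best)).2) 0 := by
  rfl

theorem pvBStrip_start (d : List (List Int)) (i : Nat) (hi : i < d.length) :
    ∀ j, j < d.length → pvGetI ((List.range d.length).map (fun j => pvGetI (pvRow d i) j)) j =
      pvMinOn (fun t => pvD d t j) i (i - 1) := by
  intro j hj
  rw [pvGetI, pvGetD_map_range _ _ j _ hj, pvMinOn_base _ _ _ (by omega)]
  rfl

theorem pvB_nonneg (d : List (List Int)) : 0 ≤ largest_cuboid_alt d := by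
  rw [pvB_fold]
  apply pvFoldl_inc_init
  intro a i hi
  have hi' : i < d.length := List.mem_range.mp hi
  exact (pvBStrip d d.length i hi' (d.length - i) i _ a le_rfl (by omega)
    (pvBStrip_start d i hi')).1

theorem pvB_ge (d : List (List Int)) (i k j l : Nat) (hik : i ≤ k) (hk : k < d.length)
    (hjl : j ≤ l) (hl : l < d.length) : pvVol d i k j l ≤ largest_cuboid_alt d := by
  rw [pvB_fold]
  refine pvFoldl_inc_ge _ i _ _ _ ?_ (List.mem_range.mpr (by omega)) ?_
  · intro a i' hi'
    have hi'' : i' < d.length := List.mem_range.mp hi'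
    exact (pvBStrip d d.length i' hi'' (d.length - i') i' _ a le_rfl (by omega)
      (pvBStrip_start d i' hi'')).1
  · intro a
    exact (pvBStrip d d.length i (by omega) (d.length - i) i _ a le_rfl (by omega)
      (pvBStrip_start d i (by omega))).2.1 k hik (by omega) j l hjl hl

theorem pvB_le (d : List (List Int)) (b : Int) (hb : 0 ≤ b)
    (h : ∀ i k j l, i ≤ k → k < d.length → j ≤ l → l < d.length → pvVol d i k j l ≤ b) :
    largest_cuboid_alt d ≤ b := by
  rw [pvB_fold]
  apply pvFoldl_inc_le _ _ _ _ hb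
  intro a i hi ha
  have hi' : i < d.length := List.mem_range.mp hi
  exact (pvBStrip d d.length i hi' (d.length - i) i _ a le_rfl (by omega)
    (pvBStrip_start d i hi')).2.2 b ha
    (fun k h1 h2 j l h3 h4 => h i k j l h1 (by omega) h3 h4)

-- ---- relating masks, widths and depths ----
theorem pvSlice_get (d : List (List Int)) (n : Nat) (dep : Int) (t x : Nat) (ht : t < n)
    (hx : x < n) : pvGetB (pvRowB (pvSlice d n dep) t) x = decide (pvD d t x ≥ dep) := by
  rw [pvSlice, pvRowB, pvGetD_map_range _ n t _ ht, pvGetB, pvGetD_map_range _ n x _ hx]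
  rfl

theorem pvWf_le_n (slice : List (List Bool)) (n t j : Nat) (ht : t < n) (hj : j < n) :
    pvWf slice n t j ≤ (n : Int) - (j : Int) := by
  rw [pvWf_eval slice n t j ht hj]
  have := pvGw_le (pvRowB slice t) n j
  push_cast
  omega

theorem pvWf_rect_ge (d : List (List Int)) (n : Nat) (dep : Int) (t j c : Nat) (ht : t < n)
    (hjc : j + c ≤ n) (hall : ∀ x, j ≤ x → x < j + c → dep ≤ pvD d t x) :
    (c : Int) ≤ pvWf (pvSlice d n dep) n t j := by
  rcases Nat.eq_zero_or_pos c with hc | hc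
  · rw [hc]
    exact_mod_cast pvWf_nonneg (pvSlice d n dep) n t j
  · have hj : j < n := by omega
    rw [pvWf_eval _ n t j ht hj]
    have := pvGw_ge (pvRowB (pvSlice d n dep) t) n j c (by omega) (fun x h1 h2 => by
      rw [pvSlice_get d n dep t x ht (by omega)]
      simp only [decide_eq_true_eq, ge_iff_le]
      exact hall x h1 h2)
    exact_mod_cast this

theorem pvWf_mem (d : List (List Int)) (n : Nat) (dep : Int) (t j x : Nat) (ht : t < n)
    (hj : j < n) (h1 : j ≤ x) (h2 : (x : Int) < (j : Int) + pvWf (pvSlice d n dep) n t j) :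
    dep ≤ pvD d t x := by
  rw [pvWf_eval _ n t j ht hj] at h2
  have hx : x < j + pvGw (pvRowB (pvSlice d n dep) t) n j := by
    push_cast at h2
    omega
  obtain ⟨hxn, hxs⟩ := pvGw_mem (pvRowB (pvSlice d n dep) t) n j x h1 hx
  rw [pvSlice_get d n dep t x ht hxn] at hxs
  simpa using hxs

theorem pvFLR_nonneg (slice : List (List Bool)) (n : Nat) (hn : 1 ≤ n) :
    0 ≤ pvFLR slice n := by
  rw [pvFLR_eq slice n hn]
  have h1 : pvWinVal slice n 0 0 0 ≤ pvSupWin slice n :=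
    pvWinVal_le_sup slice n 0 0 0 (by omega) le_rfl (by omega)
  have h2 : 0 ≤ pvWinVal slice n 0 0 0 := by
    rw [pvWinVal, pvMinOn_base _ _ _ le_rfl]
    have := pvWf_nonneg slice n 0 0
    push_cast
    omega
  omega

-- each candidate of A is dominated by B
theorem pvCell_le_B (d : List (List Int)) (hn : 1 ≤ d.length) (y x : Nat) (hy : y < d.length)
    (hx : x < d.length) : pvCellVal d d.length y x ≤ largest_cuboid_alt d := by
  set n := d.length with hnd
  set dep := pvD d y x with hdep
  rw [pvCellVal, ← hdep]
  rcases le_or_gt dep 0 with hd0 | hd0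
  · have hF0 : 0 ≤ pvFLR (pvSlice d n dep) n := pvFLR_nonneg _ n hn
    calc pvFLR (pvSlice d n dep) n * dep ≤ pvFLR (pvSlice d n dep) n * 0 :=
          mul_le_mul_of_nonneg_left hd0 hF0
      _ = 0 := mul_zero _
      _ ≤ largest_cuboid_alt d := pvB_nonneg d
  · rw [pvFLR_eq _ n hn]
    rcases pvSupWin_attain (pvSlice d n dep) n hn with ⟨j, i0, k0, hj, h1, h2, hsup⟩
    rw [hsup, pvWinVal]
    set c := pvMinOn (fun u => pvWf (pvSlice d n dep) n u j) i0 k0 with hcdef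
    have hc0 : 0 ≤ c := by
      apply pvLe_minOn _ k0 0 i0 h1
      intro u _ _
      exact pvWf_nonneg _ n u j
    rcases eq_or_lt_of_le hc0 with hc | hc
    · rw [← hc, mul_zero, zero_mul]
      exact pvB_nonneg d
    · set cN := c.toNat with hcN
      have hcc : (cN : Int) = c := Int.toNat_of_nonneg hc0
      have hcw : c ≤ pvWf (pvSlice d n dep) n i0 j := pvMinOn_le _ k0 i0 i0 le_rfl h1
      have hwn : pvWf (pvSlice d n dep) n i0 j ≤ (n : Int) - (j : Int) :=
        pvWf_le_n _ n i0 j (by omega) hj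
      have hjcn : j + cN ≤ n := by omega
      have hcN1 : 1 ≤ cN := by omega
      set l := j + cN - 1 with hldef
      have hjl : j ≤ l := by omega
      have hln : l < n := by omega
      have hRM : dep ≤ pvRectMin d i0 k0 j l := by
        apply pvLe_minOn _ l _ j hjl
        intro x' h1' h2'
        apply pvLe_minOn _ k0 _ i0 h1
        intro t ht1 ht2
        apply pvWf_mem d n dep t j x' (by omega) hj h1'
        have hcwt : c ≤ pvWf (pvSlice d n dep) n t j := pvMinOn_le _ k0 i0 t ht1 ht2
        omega
      have hl1 : ((l : Int) - (j : Int) + 1) = c := by omega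
      calc ((k0 : Int) - (i0 : Int) + 1) * c * dep
          ≤ ((k0 : Int) - (i0 : Int) + 1) * c * pvRectMin d i0 k0 j l := by
            apply mul_le_mul_of_nonneg_left hRM
            have : (0 : Int) ≤ (k0 : Int) - (i0 : Int) + 1 := by omega
            positivity
        _ = pvVol d i0 k0 j l := by rw [pvVol, hl1]; ring
        _ ≤ largest_cuboid_alt d := pvB_ge d i0 k0 j l h1 h2 hjl hln

-- each candidate of B is dominated by A
theorem pvVol_le_A (d : List (List Int)) (hn : 1 ≤ d.length) (i k j l : Nat) (hik : i ≤ k)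
    (hk : k < d.length) (hjl : j ≤ l) (hl : l < d.length) :
    pvVol d i k j l ≤ largest_cuboid d := by
  set n := d.length with hnd
  set md := pvRectMin d i k j l with hmd
  rcases le_or_gt md 0 with hd0 | hd0
  · have : pvVol d i k j l ≤ 0 := by
      rw [pvVol, ← hmd]
      have h1 : (0 : Int) ≤ ((k : Int) - (i : Int) + 1) := by omega
      have h2 : (0 : Int) ≤ ((l : Int) - (j : Int) + 1) := by omega
      have := mul_nonpos_of_nonneg_of_nonpos h2 hd0
      exact mul_nonpos_of_nonneg_of_nonpos h1 this
    exact le_trans this (pvA_nonneg d)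
  · -- the minimum depth is attained at some cell (t, x) of the rectangle
    rcases pvMinOn_attain' (fun x => pvMinOn (fun t => pvD d t x) i k) j l hjl
      with ⟨x, hx1, hx2, hx3⟩
    rcases pvMinOn_attain' (fun t => pvD d t x) i k hik with ⟨t, ht1, ht2, ht3⟩
    have hmdtx : md = pvD d t x := by rw [hmd, pvRectMin, hx3, ht3]
    have htn : t < n := by omega
    have hxn : x < n := by omega
    have hRMle : ∀ u x', i ≤ u → u ≤ k → j ≤ x' → x' ≤ l → md ≤ pvD d u x' := by
      intro u x' h1 h2 h3 h4
      rw [hmd, pvRectMin]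
      exact le_trans (pvMinOn_le _ l j x' h3 h4) (pvMinOn_le _ k i u h1 h2)
    set dep := pvD d t x with hdep
    have hdep0 : 0 < dep := by rw [← hmdtx] at hdep ⊢; omega
    -- the widths in the mask for threshold dep cover the rectangle
    have hwge : ((l : Int) - (j : Int) + 1) ≤
        pvMinOn (fun u => pvWf (pvSlice d n dep) n u j) i k := by
      apply pvLe_minOn _ k _ i hik
      intro u h1 h2
      have := pvWf_rect_ge d n dep u j (l + 1 - j) (by omega) (by omega) (fun x' hx1' hx2' => by
        have hh := hRMle u x' h1 h2 hx1' (by omega)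
        rw [hmdtx] at hh
        exact hh)
      push_cast at this ⊢
      omega
    have hsup : ((k : Int) - (i : Int) + 1) * (((l : Int) - (j : Int) + 1)) ≤
        pvSupWin (pvSlice d n dep) n := by
      have hwv : ((k : Int) - (i : Int) + 1) * (((l : Int) - (j : Int) + 1)) ≤
          pvWinVal (pvSlice d n dep) n j i k := by
        rw [pvWinVal]
        apply mul_le_mul_of_nonneg_left hwge (by omega)
      exact le_trans hwv (pvWinVal_le_sup _ n j i k (by omega) hik (by omega))
    calc pvVol d i k j l = ((k : Int) - (i : Int) + 1) * (((l : Int) - (j : Int) + 1)) * dep := by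
          rw [pvVol, (hmd.symm.trans hmdtx).trans hdep.symm]; ring
      _ ≤ pvSupWin (pvSlice d n dep) n * dep := mul_le_mul_of_nonneg_right hsup (by omega)
      _ = pvCellVal d n t x := by rw [pvCellVal, ← hdep, pvFLR_eq _ n hn]
      _ ≤ largest_cuboid d := pvA_ge d t x htn hxn

-- ===== VERDICT (by name: the statement is the Claim_ definition above) =====
theorem largest_cuboid_spec : Claim_equal_largest_cuboid := by
  intro d _ _
  show largest_cuboid d = largest_cuboid_alt d
  rcases Nat.eq_zero_or_pos d.length with h0 | hn
  · have hd : d = [] := List.length_eq_zero_iff.mp h0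
    subst hd
    rfl
  · apply le_antisymm
    · exact pvA_le d (largest_cuboid_alt d) (pvB_nonneg d) (fun y x hy hx => pvCell_le_B d hn y x hy hx)
    · exact pvB_le d (largest_cuboid d) (pvA_nonneg d)
        (fun i k j l h1 h2 h3 h4 => pvVol_le_A d hn i k j l h1 h2 h3 h4)
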